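-- pv_equiv track=rewrite | github.com/Fresh-vano/Winstrike-kids | backend/app.py | determine_element_status
-- ===== SOURCE A (Python) =====
-- def determine_element_status(characteristics):
--     element_status = 'good'
--
--     for char in characteristics:
--         if char['status'] == 'bad':
--             element_status = 'bad'
--             break
--         elif char['status'] == 'normal':
--             element_status = 'normal'
--
--     return element_status
-- ===== SOURCE B (Python) =====
-- def determine_element_status(characteristics):
--     if any(char['status'] == 'bad' for char in characteristics):
--         return 'bad'
--     if any(char['status'] == 'normal' for char in characteristics):
--         return 'normal'
--     return 'good'
-- ===== Notes on version B (the rewrite author's own statement) =====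
-- stated objective: idiomatic
-- what changed: Replaced the single accumulator loop with break by two short-circuiting any() membership scans in priority order (bad, then normal).
import Mathlib
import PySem

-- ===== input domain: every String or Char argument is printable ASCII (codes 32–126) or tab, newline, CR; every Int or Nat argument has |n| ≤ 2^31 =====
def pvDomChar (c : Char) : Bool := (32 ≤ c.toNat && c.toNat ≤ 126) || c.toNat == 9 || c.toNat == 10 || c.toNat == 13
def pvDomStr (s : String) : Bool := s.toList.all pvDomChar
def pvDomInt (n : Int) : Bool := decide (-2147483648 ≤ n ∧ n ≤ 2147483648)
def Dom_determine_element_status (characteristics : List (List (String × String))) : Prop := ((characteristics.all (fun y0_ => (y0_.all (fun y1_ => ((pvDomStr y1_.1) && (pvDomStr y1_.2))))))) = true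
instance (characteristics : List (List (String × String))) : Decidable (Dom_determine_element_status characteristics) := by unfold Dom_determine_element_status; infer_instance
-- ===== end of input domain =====

-- B replaces A's accumulator loop (with break) by two short-circuiting any() scans in
-- priority order; equal return values proved on all inputs where A does not raise KeyError.

-- ===== PORT A =====
-- A's loop: accumulator 'element_status', break on 'bad'; char['status'] on a dict whose
-- first binding for "status" is the value (List.lookup = first match). Where Python would
-- raise KeyError (no "status" key reached by the loop) the port returns "" — excluded by Pre_.
def detLoopA (cs : List (List (String × String))) (element_status : String) : String :=
  match cs with
  | [] => element_status
  | char :: rest =>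
    match List.lookup "status" char with
    | none => ""  -- Python: KeyError (outside Pre_)
    | some s =>
      if s == "bad" then "bad"
      else if s == "normal" then detLoopA rest "normal"
      else detLoopA rest element_status

def determine_element_status (characteristics : List (List (String × String))) : String :=
  detLoopA characteristics "good"

-- ===== PORT B =====
-- any(char['status'] == 'bad' …): missing key raises in Python; port treats it as a non-match
-- (only reachable outside Pre_).
def determine_element_status_alt (characteristics : List (List (String × String))) : String :=
  if characteristics.any (fun char => List.lookup "status" char == some "bad") then "bad"
  else if characteristics.any (fun char => List.lookup "status" char == some "normal") then "normal"
  else "good"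

-- ===== PRECONDITION & SPEC =====
-- Pre_ = exactly the inputs where A returns: every element actually reached by the loop
-- (i.e. not strictly after the first 'bad' element) has a "status" key; A (and B) raise
-- KeyError otherwise.
def Pre_determine_element_status (characteristics : List (List (String × String))) : Prop :=
  ∀ i < characteristics.length,
    (∀ j < i, List.lookup "status" (characteristics.getD j []) ≠ some "bad") →
    (List.lookup "status" (characteristics.getD i [])).isSome
instance (characteristics : List (List (String × String))) : Decidable (Pre_determine_element_status characteristics) := by unfold Pre_determine_element_status; infer_instance

def pvWitness_determine_element_status : (List (List (String × String))) :=
  [[("status", "normal")], [("status", "good")], [("status", "bad")], [("oops", "x")]]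

def Spec_determine_element_status (characteristics : List (List (String × String))) (out : String) : Prop := out = determine_element_status_alt characteristics
instance (characteristics : List (List (String × String))) (out : String) : Decidable (Spec_determine_element_status characteristics out) := by unfold Spec_determine_element_status; infer_instance

-- ===== CLAIM (what is proved, stated in full; the proofs are below) =====
def Claim_equal_determine_element_status : Prop := ∀ (characteristics : List (List (String × String))), Dom_determine_element_status characteristics → Pre_determine_element_status characteristics → Spec_determine_element_status characteristics (determine_element_status characteristics)

-- ===== LEMMAS AND PROOFS =====

lemma pre_cons {c : List (String × String)} {rest : List (List (String × String))}
    (h : Pre_determine_element_status (c :: rest)) :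
    (List.lookup "status" c).isSome ∧
      (List.lookup "status" c ≠ some "bad" → Pre_determine_element_status rest) := by
  constructor
  · have := h 0 (by simp) (by omega)
    simpa using this
  · intro hnb i hi hj
    have := h (i + 1) (by simpa using Nat.succ_lt_succ hi) ?_
    · simpa using this
    · intro j hj'
      match j with
      | 0 => simpa using hnb
      | k + 1 =>
        have := hj k (by omega)
        simpa using this

lemma loop_eq (cs : List (List (String × String))) (acc : String)
    (hpre : Pre_determine_element_status cs) :
    detLoopA cs acc =
      if cs.any (fun char => List.lookup "status" char == some "bad") then "bad"
      else if cs.any (fun char => List.lookup "status" char == some "normal") then "normal"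
      else acc := by
  induction cs generalizing acc with
  | nil => simp [detLoopA]
  | cons c rest ih =>
    obtain ⟨hsome, hrest⟩ := pre_cons hpre
    obtain ⟨s, hs⟩ := Option.isSome_iff_exists.mp hsome
    by_cases hb : s = "bad"
    · subst hb
      simp [detLoopA, hs]
    · have hpre' : Pre_determine_element_status rest := hrest (by simp [hs, hb])
      by_cases hn : s = "normal"
      · subst hn
        have := ih "normal" hpre'
        simp [detLoopA, hs, this]

      · rw [show detLoopA (c :: rest) acc = detLoopA rest acc by simp [detLoopA, hs, hb, hn]]
        rw [ih acc hpre']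
        simp [hs, hb, hn]

-- ===== VERDICT (by name: the statement is the Claim_ definition above) =====
theorem determine_element_status_spec : Claim_equal_determine_element_status := by
  intro cs _ hpre
  unfold Spec_determine_element_status determine_element_status determine_element_status_alt
  exact loop_eq cs "good" hpre
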